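-- pv_equiv track=rewrite | github.com/RomoloDef/Informatica-Triennale | 1° Anno/Fondamenti di Programmazione/2023-2024/Homework/HW4req/program01.py | trasformazione_in_lista
-- ===== SOURCE A (Python) =====
-- def trasformazione_in_lista(stringa: str):
--     lista = list(stringa)
--     char = len(lista) - 1
--
--     while char > 0:
--         if lista[char] in ['+', '-'] and lista[char - 1].isdigit():
--             lista[char - 1] += lista[char]
--             lista.pop(char)
--         char -= 1
--
--     return lista
-- ===== SOURCE B (Python) =====
-- def trasformazione_in_lista(stringa: str):
--     res = []
--     for c in stringa:
--         if c in ('+', '-') and res and res[-1].isdigit():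
--             res[-1] += c
--         else:
--             res.append(c)
--     return res
-- ===== Notes on version B (the rewrite author's own statement) =====
-- stated objective: alternative
-- what changed: Replaced the right-to-left while-loop that merges a sign into the previous digit by mutating the list and popping (each pop shifts the tail) with a single left-to-right pass that appends tokens to a fresh result list and extends its last element when a sign follows a single digit; intended as faster, measured only ~1.4x at the largest timed size.
import Mathlib
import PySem

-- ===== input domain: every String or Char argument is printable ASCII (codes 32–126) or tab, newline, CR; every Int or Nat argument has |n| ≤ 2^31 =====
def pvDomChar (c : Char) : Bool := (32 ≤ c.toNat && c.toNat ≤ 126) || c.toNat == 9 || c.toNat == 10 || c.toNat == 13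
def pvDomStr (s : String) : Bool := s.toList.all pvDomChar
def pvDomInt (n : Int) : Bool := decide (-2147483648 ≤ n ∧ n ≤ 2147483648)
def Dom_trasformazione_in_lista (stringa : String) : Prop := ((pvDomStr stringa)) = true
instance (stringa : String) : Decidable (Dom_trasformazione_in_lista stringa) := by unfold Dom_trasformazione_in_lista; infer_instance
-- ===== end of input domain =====

-- B replaces A's right-to-left while-loop with in-place pop by a single left-to-right pass
-- appending tokens to a result list (alternative algorithm, same return value; measured ~1.4x
-- faster at the largest timed size, below the 1.5x bar, so no speed is claimed).

-- ===== PORT A =====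
-- tokens are kept as List Char (PySem convention: string facts live on the char-list side);
-- the return maps String.mk over them.
def pvCondB (t : List Char) (c : List Char) : Bool :=
  (c == ['+'] || c == ['-']) && PySem.Chars.strIsdigit t

-- the while-loop: `char` counts down; body = the if of A, then char -= 1
def pvA_loop (lista : List (List Char)) : Nat → List (List Char)
  | 0 => lista
  | c + 1 =>
    let cur := lista.getD (c + 1) []
    let prev := lista.getD c []
    let lista' :=
      if pvCondB prev cur then (lista.set c (prev ++ cur)).eraseIdx (c + 1) else lista
    pvA_loop lista' c

def trasformazione_in_lista (stringa : String) : List String :=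
  (pvA_loop (stringa.toList.map (fun ch => [ch]))
      ((stringa.toList.map (fun ch => ([ch] : List Char))).length - 1)).map
    (fun t => String.ofList t)

-- ===== PORT B =====
-- Source B keeps `res` and appends / extends the last element; here `res` is kept reversed
-- (head = Python's res[-1]) and reversed once at the end.
def pvB_step (res : List (List Char)) (c : Char) : List (List Char) :=
  match res with
  | t :: rest => if pvCondB t [c] then (t ++ [c]) :: rest else [c] :: t :: rest
  | [] => [[c]]

def trasformazione_in_lista_alt (stringa : String) : List String :=
  ((stringa.toList.foldl pvB_step []).reverse).map (fun t => String.ofList t)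

-- ===== PRECONDITION & SPEC =====
def Spec_trasformazione_in_lista (stringa : String) (out : List String) : Prop := out = trasformazione_in_lista_alt stringa
instance (stringa : String) (out : List String) : Decidable (Spec_trasformazione_in_lista stringa out) := by unfold Spec_trasformazione_in_lista; infer_instance

-- ===== CLAIM (what is proved, stated in full; the proofs are below) =====
def Claim_equal_trasformazione_in_lista : Prop := ∀ (stringa : String), Dom_trasformazione_in_lista stringa → Spec_trasformazione_in_lista stringa (trasformazione_in_lista stringa)

-- ===== LEMMAS AND PROOFS =====

-- the common specification both ports compute: greedy left-to-right merge, two chars at a time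
def pvG : List Char → List (List Char)
  | [] => []
  | [a] => [[a]]
  | a :: b :: rest =>
    if pvCondB [a] [b] then [a, b] :: pvG rest else [a] :: pvG (b :: rest)
termination_by l => l.length

theorem pv_strIsdigit_pair_sign (a b : Char) (h : b = '+' ∨ b = '-') :
    PySem.Chars.strIsdigit [a, b] = false := by
  rcases h with h | h <;> subst h <;> simp [PySem.Chars.strIsdigit] <;>
    exact fun _ => by decide

theorem pvCondB_true {t c : List Char} (h : pvCondB t c = true) :
    (c = ['+'] ∨ c = ['-']) ∧ PySem.Chars.strIsdigit t = true := by
  simp [pvCondB] at h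
  tauto

theorem pvG_sign (s : Char) (hs : s = '+' ∨ s = '-') (rest : List Char) :
    pvG (s :: rest) = [s] :: pvG rest := by
  cases rest with
  | nil => simp [pvG]
  | cons b r =>
    have hd : PySem.Chars.strIsdigit [s] = false := by
      rcases hs with h | h <;> subst h <;> decide
    simp [pvG, pvCondB, hd]

theorem pvG_head_sign (x : Char) (rest : List Char)
    (hsign : (pvG (x :: rest)).getD 0 [] = ['+'] ∨ (pvG (x :: rest)).getD 0 [] = ['-']) :
    x = '+' ∨ x = '-' := by
  cases rest with
  | nil =>
    simp [pvG] at hsign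
    rcases hsign with h | h <;> [left; right] <;> simp_all
  | cons b r =>
    by_cases hc : pvCondB [x] [b] = true
    · simp [pvG, hc] at hsign
    · simp [pvG, hc] at hsign
      rcases hsign with h | h <;> [left; right] <;> simp_all

theorem pv_eraseIdx_append (l1 l2 : List (List Char)) :
    (l1 ++ l2).eraseIdx l1.length = l1 ++ l2.eraseIdx 0 := by
  induction l1 with
  | nil => simp
  | cons x xs ih => simp [List.eraseIdx_cons_succ, ih]

theorem pvB_fold (cs : List Char) :
    ∀ (r : List (List Char)),
      (∀ t rt c ct, r = t :: rt → cs = c :: ct → pvCondB t [c] = false) →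
      List.foldl pvB_step r cs = (pvG cs).reverse ++ r := by
  induction cs using pvG.induct with
  | case1 =>
    intro r _
    simp [pvG]
  | case2 a =>
    intro r hok
    cases r with
    | nil => simp [pvG, pvB_step]
    | cons t rt => simp [pvG, pvB_step, hok t rt a [] rfl rfl]
  | case3 a b rest hc ih =>
    intro r hok
    have h1 : pvB_step r a = [a] :: r := by
      cases r with
      | nil => rfl
      | cons t rt => simp [pvB_step, hok t rt a (b :: rest) rfl rfl]
    have hb : b = '+' ∨ b = '-' := by
      rcases (pvCondB_true hc).1 with h | h <;> [left; right] <;> simp_all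
    have h2 : pvB_step ([a] :: r) b = [a, b] :: r := by simp [pvB_step, hc]
    have h3 := ih ([a, b] :: r) (by
      intro t rt c ct ht hrest
      obtain ⟨ht1, ht2⟩ := List.cons.injEq .. ▸ ht
      subst ht1
      simp [pvCondB, pv_strIsdigit_pair_sign a b hb])
    simp only [List.foldl_cons, h1, h2, h3]
    simp [pvG, hc]
  | case4 a b rest hc ih =>
    intro r hok
    have h1 : pvB_step r a = [a] :: r := by
      cases r with
      | nil => rfl
      | cons t rt => simp [pvB_step, hok t rt a (b :: rest) rfl rfl]
    have h3 := ih ([a] :: r) (by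
      intro t rt c ct ht hrest
      obtain ⟨ht1, ht2⟩ := List.cons.injEq .. ▸ ht
      obtain ⟨hc1, hc2⟩ := List.cons.injEq .. ▸ hrest
      subst ht1; subst hc1
      simpa using hc)
    simp only [List.foldl_cons, h1, h3]
    simp [pvG, hc]

theorem pvA_inv (cs : List Char) : ∀ (k : Nat), k < cs.length →
    pvA_loop ((cs.take k).map (fun ch => [ch]) ++ pvG (cs.drop k)) k = pvG cs := by
  intro k
  induction k with
  | zero => intro _; simp [pvA_loop]
  | succ k ih =>
    intro hk1
    have hk : k < cs.length := by omega
    have hM : ((cs.take k).map (fun ch => ([ch] : List Char))).length = k := by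
      simp; omega
    have hP : (cs.take (k + 1)).map (fun ch => ([ch] : List Char)) =
        (cs.take k).map (fun ch => [ch]) ++ [[cs[k]]] := by
      rw [List.take_succ_eq_append_getElem hk, List.map_append]; rfl
    have hdrop1 : cs.drop (k + 1) = cs[k + 1] :: cs.drop (k + 2) :=
      List.drop_eq_getElem_cons hk1
    have hdrop0 : cs.drop k = cs[k] :: cs[k + 1] :: cs.drop (k + 2) := by
      rw [List.drop_eq_getElem_cons hk, hdrop1]
    rw [hP]
    generalize hMdef : (cs.take k).map (fun ch => ([ch] : List Char)) = M at hM ih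
    generalize hTdef : pvG (cs.drop (k + 1)) = T
    have hlenP : (M ++ [[cs[k]]]).length = k + 1 := by simp [hM]
    have hcur : (M ++ [[cs[k]]] ++ T).getD (k + 1) [] = T.getD 0 [] := by
      rw [List.getD_append_right _ _ _ _ (by omega)]
      simp [hlenP]
    have hprev : (M ++ [[cs[k]]] ++ T).getD k [] = [cs[k]] := by
      rw [List.getD_append _ _ _ _ (by omega),
          List.getD_append_right _ _ _ _ (by omega)]
      simp [hM]
    have step : pvA_loop (M ++ [[cs[k]]] ++ T) (k + 1) =
        pvA_loop (if pvCondB ((M ++ [[cs[k]]] ++ T).getD k [])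
            ((M ++ [[cs[k]]] ++ T).getD (k + 1) []) then
          ((M ++ [[cs[k]]] ++ T).set k ((M ++ [[cs[k]]] ++ T).getD k [] ++
            (M ++ [[cs[k]]] ++ T).getD (k + 1) [])).eraseIdx (k + 1)
        else (M ++ [[cs[k]]] ++ T)) k := rfl
    by_cases hcond : pvCondB [cs[k]] (T.getD 0 []) = true
    · -- merge step: positions k and k+1 combine
      have hdig : PySem.Chars.strIsdigit [cs[k]] = true := (pvCondB_true hcond).2
      have hsig : T.getD 0 [] = ['+'] ∨ T.getD 0 [] = ['-'] := (pvCondB_true hcond).1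
      have hx : cs[k + 1] = '+' ∨ cs[k + 1] = '-' := by
        apply pvG_head_sign (cs[k + 1]) (cs.drop (k + 2))
        rw [← hdrop1, hTdef]; exact hsig
      have hT : T = [cs[k + 1]] :: pvG (cs.drop (k + 2)) := by
        rw [← hTdef, hdrop1, pvG_sign _ hx]
      have hcur' : T.getD 0 [] = [cs[k + 1]] := by rw [hT]; rfl
      have hGk : pvG (cs.drop k) = [cs[k], cs[k + 1]] :: pvG (cs.drop (k + 2)) := by
        rw [hdrop0]
        have hcb : pvCondB [cs[k]] [cs[k + 1]] = true := by
          rw [← hcur']; exact hcond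
        rw [pvG, if_pos hcb]
      have hL' : ((M ++ [[cs[k]]] ++ T).set k ([cs[k]] ++ [cs[k + 1]])).eraseIdx (k + 1) =
          M ++ pvG (cs.drop k) := by
        rw [List.set_append_left _ _ (by omega),
            List.set_append_right _ _ (by omega)]
        have hset : ([[cs[k]]] : List (List Char)).set (k - M.length) ([cs[k]] ++ [cs[k + 1]]) =
            [[cs[k], cs[k + 1]]] := by simp [hM]
        rw [hset]
        have hlen2 : (M ++ [[cs[k], cs[k + 1]]]).length = k + 1 := by simp [hM]
        have herase := pv_eraseIdx_append (M ++ [[cs[k], cs[k + 1]]]) T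
        rw [hlen2] at herase
        rw [herase, hT, hGk]
        simp
      rw [step, hprev, hcur, if_pos hcond, hcur', hL']
      exact ih hk
    · -- no merge: the list is unchanged
      have hGk : pvG (cs.drop k) = [cs[k]] :: pvG (cs.drop (k + 1)) := by
        rw [hdrop0]
        have hcf : pvCondB [cs[k]] [cs[k + 1]] = false := by
          by_contra hcc
          have hcc' : pvCondB [cs[k]] [cs[k + 1]] = true := by
            cases h : pvCondB [cs[k]] [cs[k + 1]] <;> simp_all
          have hx : cs[k + 1] = '+' ∨ cs[k + 1] = '-' := by
            rcases (pvCondB_true hcc').1 with h | h <;> [left; right] <;> simp_all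
          have hT : T = [cs[k + 1]] :: pvG (cs.drop (k + 2)) := by
            rw [← hTdef, hdrop1, pvG_sign _ hx]
          have : pvCondB [cs[k]] (T.getD 0 []) = true := by
            rw [hT]; exact hcc'
          exact hcond this
        rw [pvG, if_neg (by simp [hcf]), ← hdrop1]
      rw [step, hprev, hcur, if_neg hcond]
      have : M ++ [[cs[k]]] ++ T = M ++ pvG (cs.drop k) := by
        rw [hGk, ← hTdef]
        simp
      rw [this]
      exact ih hk

theorem ports_agree (cs : List Char) :
    pvA_loop (cs.map (fun ch => [ch])) (cs.length - 1) = (cs.foldl pvB_step []).reverse := by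
  have hfold : (cs.foldl pvB_step []).reverse = pvG cs := by
    rw [pvB_fold cs [] (by intro t rt c ct h; simp at h)]
    simp
  rw [hfold]
  cases hcs : cs with
  | nil => simp [pvA_loop, pvG]
  | cons a rest =>
    rw [← hcs]
    have hlen : 0 < cs.length := by rw [hcs]; simp
    have hk : cs.length - 1 < cs.length := by omega
    have hdrop : cs.drop (cs.length - 1) = [cs[cs.length - 1]] := by
      rw [List.drop_eq_getElem_cons hk]
      have : cs.drop (cs.length - 1 + 1) = [] := by
        apply List.drop_eq_nil_of_le; omega
      rw [this]
    have hsplit : cs.map (fun ch => ([ch] : List Char)) =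
        (cs.take (cs.length - 1)).map (fun ch => [ch]) ++ pvG (cs.drop (cs.length - 1)) := by
      rw [hdrop]
      conv_lhs => rw [← List.take_append_drop (cs.length - 1) cs]
      rw [List.map_append, hdrop]
      simp [pvG]
    rw [hsplit]
    exact pvA_inv cs (cs.length - 1) hk

-- ===== VERDICT (by name: the statement is the Claim_ definition above) =====
theorem trasformazione_in_lista_spec : Claim_equal_trasformazione_in_lista := by
  intro s _
  show trasformazione_in_lista s = trasformazione_in_lista_alt s
  unfold trasformazione_in_lista trasformazione_in_lista_alt
  rw [List.length_map, ports_agree]
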